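-- pv_equiv track=rewrite | github.com/MinsangKong/Study | Review(Implement)/5-1.py | sum_card
-- ===== SOURCE A (Python) =====
-- def sum_card(n):
--     num = 0
--     for i in range(len(n)-2):
--         for j in range(i+1,len(n)-1):
--             for k in range(j+1, len(n)):
--                 count = (n[i]+n[j]+n[k])%10
--                 if num < count:
--                     num=count
--     return num
-- ===== SOURCE B (Python) =====
-- def sum_card(n):
--     # DP over the list: sets of residues achievable as (sum of a k-element
--     # subsequence) % 10, for k = 1, 2, 3; answer is max over the 3-sets.
--     s1, s2, s3 = set(), set(), set()
--     for x in n: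
--         r = x % 10
--         s3 |= {(s + r) % 10 for s in s2}
--         s2 |= {(s + r) % 10 for s in s1}
--         s1.add(r)
--     return max(s3, default=0)
-- ===== Notes on version B (the rewrite author's own statement) =====
-- stated objective: faster
-- what changed: Replaces the O(n^3) triple-index scan with a one-pass DP that maintains the sets of residues mod 10 reachable by 1-, 2- and 3-element subsequences (each set has at most 10 elements) and returns the max of the 3-element set.
import Mathlib
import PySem

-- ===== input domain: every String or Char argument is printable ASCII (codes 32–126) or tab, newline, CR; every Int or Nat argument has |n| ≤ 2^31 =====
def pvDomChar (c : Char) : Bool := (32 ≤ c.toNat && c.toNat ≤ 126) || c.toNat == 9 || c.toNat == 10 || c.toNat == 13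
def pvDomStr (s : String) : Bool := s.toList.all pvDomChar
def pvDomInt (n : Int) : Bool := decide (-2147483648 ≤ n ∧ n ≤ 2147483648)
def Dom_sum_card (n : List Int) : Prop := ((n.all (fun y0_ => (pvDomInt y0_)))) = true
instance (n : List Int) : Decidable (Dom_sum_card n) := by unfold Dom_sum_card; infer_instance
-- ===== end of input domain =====

-- B replaces A's O(n^3) triple-index scan by a one-pass DP over sets of residues mod 10
-- reachable by 1-, 2- and 3-element subsequences; objective: faster.

-- ===== PORT A =====
-- n[i]/n[j]/n[k]: the range indices are always valid here, so pyGetD … 0 is exact.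
def sum_card (n : List Int) : Int :=
  (PySem.List.pyRange 0 ((n.length : Int) - 2) 1).foldl (fun num i =>
    (PySem.List.pyRange (i + 1) ((n.length : Int) - 1) 1).foldl (fun num j =>
      (PySem.List.pyRange (j + 1) (n.length : Int) 1).foldl (fun num k =>
        let count := PySem.Int.mod
          (PySem.List.pyGetD n i 0 + PySem.List.pyGetD n j 0 + PySem.List.pyGetD n k 0) 10
        if num < count then count else num) num) num) 0

-- ===== PORT B =====
-- one loop iteration of Source B: st = (s1, s2, s3)
def sumCardStep (st : PySem.Set Int × PySem.Set Int × PySem.Set Int) (x : Int) :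
    PySem.Set Int × PySem.Set Int × PySem.Set Int :=
  let r := PySem.Int.mod x 10
  let s3 := PySem.Set.update st.2.2 (st.2.1.map (fun s => PySem.Int.mod (s + r) 10))
  let s2 := PySem.Set.update st.2.1 (st.1.map (fun s => PySem.Int.mod (s + r) 10))
  let s1 := PySem.Set.add st.1 r
  (s1, s2, s3)

def sum_card_alt (n : List Int) : Int :=
  let st := n.foldl sumCardStep (PySem.Set.empty, PySem.Set.empty, PySem.Set.empty)
  match PySem.List.max? st.2.2 (fun y => y) with   -- max(s3, default=0)
  | none => 0
  | some m => m

-- ===== PRECONDITION & SPEC =====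
def Spec_sum_card (n : List Int) (out : Int) : Prop := out = sum_card_alt n
instance (n : List Int) (out : Int) : Decidable (Spec_sum_card n out) := by unfold Spec_sum_card; infer_instance

-- ===== CLAIM (what is proved, stated in full; the proofs are below) =====
def Claim_equal_sum_card : Prop := ∀ (n : List Int), Dom_sum_card n → Spec_sum_card n (sum_card n)

-- ===== LEMMAS AND PROOFS =====

-- residues reachable by 1-/2-/3-element subsequences of p, taken mod 10
def pvR1 (p : List Int) (r : Int) : Prop := ∃ a, a ∈ p ∧ r = a % 10
def pvR2 (p : List Int) (r : Int) : Prop := ∃ a b, [a, b].Sublist p ∧ r = (a + b) % 10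
def pvR3 (p : List Int) (r : Int) : Prop := ∃ a b c, [a, b, c].Sublist p ∧ r = (a + b + c) % 10

-- fold over a list where the body also sees the tail after the current element
def pvTails (F : Int → Int → List Int → Int) : List Int → Int → Int
  | [], acc => acc
  | b :: l, acc => pvTails F l (F acc b l)

-- structural forms of A's three loops
def pvAK (s : Int) (l : List Int) (acc : Int) : Int :=
  l.foldl (fun a b => max a ((s + b) % 10)) acc
def pvAJ (x : Int) (l : List Int) (acc : Int) : Int :=
  pvTails (fun acc b tail => pvAK (x + b) tail acc) l acc
def pvAI (l : List Int) (acc : Int) : Int :=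
  pvTails (fun acc a tail => pvAJ a tail acc) l acc

lemma pv_if_max (a c : Int) : (if a < c then c else a) = max a c := by omega

lemma pv_sublist_concat {α : Type} (l p : List α) (x : α) :
    l.Sublist (p ++ [x]) ↔ l.Sublist p ∨ ∃ l', l = l' ++ [x] ∧ l'.Sublist p := by
  rw [List.sublist_append_iff]
  constructor
  · rintro ⟨l1, l2, rfl, h1, h2⟩
    rcases List.sublist_singleton.mp h2 with rfl | rfl
    · left; simpa using h1
    · right; exact ⟨l1, rfl, h1⟩
  · rintro (h | ⟨l', rfl, h⟩)
    · exact ⟨l, [], by simp, h, by simp⟩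
    · exact ⟨l', [x], rfl, h, by simp⟩

lemma pv_sub2_concat (a b x : Int) (p : List Int) :
    [a, b].Sublist (p ++ [x]) ↔ [a, b].Sublist p ∨ (a ∈ p ∧ b = x) := by
  rw [pv_sublist_concat]
  constructor
  · rintro (h | ⟨l', he, h⟩)
    · exact Or.inl h
    · cases l' with
      | nil => simp at he
      | cons a' t =>
        cases t with
        | nil =>
          simp at he
          obtain ⟨rfl, rfl⟩ := he
          exact Or.inr ⟨List.singleton_sublist.mp h, rfl⟩
        | cons b' t' =>
          have := congrArg List.length he; simp at this
  · rintro (h | ⟨ha, rfl⟩)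
    · exact Or.inl h
    · exact Or.inr ⟨[a], rfl, List.singleton_sublist.mpr ha⟩

lemma pv_sub3_concat (a b c x : Int) (p : List Int) :
    [a, b, c].Sublist (p ++ [x]) ↔ [a, b, c].Sublist p ∨ ([a, b].Sublist p ∧ c = x) := by
  rw [pv_sublist_concat]
  constructor
  · rintro (h | ⟨l', he, h⟩)
    · exact Or.inl h
    · cases l' with
      | nil => simp at he
      | cons a' t =>
        cases t with
        | nil => simp at he
        | cons b' t' =>
          cases t' with
          | nil =>
            simp at he
            obtain ⟨rfl, rfl, rfl⟩ := he
            exact Or.inr ⟨h, rfl⟩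
          | cons c' t'' =>
            have := congrArg List.length he; simp at this
  · rintro (h | ⟨hab, rfl⟩)
    · exact Or.inl h
    · exact Or.inr ⟨[a, b], rfl, by simpa using hab⟩

-- ---- B-side invariant ----
lemma pvB_inv :
    ∀ (l p : List Int) (s1 s2 s3 : PySem.Set Int),
      (∀ r, r ∈ s1 ↔ pvR1 p r) → (∀ r, r ∈ s2 ↔ pvR2 p r) → (∀ r, r ∈ s3 ↔ pvR3 p r) →
      (∀ r, r ∈ (l.foldl sumCardStep (s1, s2, s3)).1 ↔ pvR1 (p ++ l) r) ∧
      (∀ r, r ∈ (l.foldl sumCardStep (s1, s2, s3)).2.1 ↔ pvR2 (p ++ l) r) ∧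
      (∀ r, r ∈ (l.foldl sumCardStep (s1, s2, s3)).2.2 ↔ pvR3 (p ++ l) r) := by
  intro l
  induction l with
  | nil => intro p s1 s2 s3 h1 h2 h3; simpa using ⟨h1, h2, h3⟩
  | cons x l ih =>
    intro p s1 s2 s3 h1 h2 h3
    have hmod : ∀ a : Int, PySem.Int.mod a 10 = a % 10 := fun a =>
      PySem.Int.mod_eq_emod_of_pos (by norm_num)
    have h1' : ∀ r, r ∈ (sumCardStep (s1, s2, s3) x).1 ↔ pvR1 (p ++ [x]) r := by
      intro r
      simp only [sumCardStep, PySem.Set.mem_add, h1, hmod, pvR1, List.mem_append,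
        List.mem_singleton]
      constructor
      · rintro (⟨a, ha, rfl⟩ | rfl)
        · exact ⟨a, Or.inl ha, rfl⟩
        · exact ⟨x, Or.inr rfl, rfl⟩
      · rintro ⟨a, ha | rfl, rfl⟩
        · exact Or.inl ⟨a, ha, rfl⟩
        · exact Or.inr rfl
    have h2' : ∀ r, r ∈ (sumCardStep (s1, s2, s3) x).2.1 ↔ pvR2 (p ++ [x]) r := by
      intro r
      simp only [sumCardStep, PySem.Set.mem_update, List.mem_map, h2, pvR2, pv_sub2_concat]
      constructor
      · rintro (⟨a, b, hs, rfl⟩ | ⟨s, hs, rfl⟩)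
        · exact ⟨a, b, Or.inl hs, rfl⟩
        · obtain ⟨a, ha, rfl⟩ := (h1 s).mp hs
          refine ⟨a, x, Or.inr ⟨ha, rfl⟩, ?_⟩
          rw [hmod, hmod, Int.add_emod a x 10]
      · rintro ⟨a, b, hs | ⟨ha, hb⟩, rfl⟩
        · exact Or.inl ⟨a, b, hs, rfl⟩
        · rw [hb]
          refine Or.inr ⟨a % 10, (h1 (a % 10)).mpr ⟨a, ha, rfl⟩, ?_⟩
          rw [hmod, hmod, Int.add_emod a x 10]
    have h3' : ∀ r, r ∈ (sumCardStep (s1, s2, s3) x).2.2 ↔ pvR3 (p ++ [x]) r := by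
      intro r
      simp only [sumCardStep, PySem.Set.mem_update, List.mem_map, h3, pvR3, pv_sub3_concat]
      constructor
      · rintro (⟨a, b, c, hs, rfl⟩ | ⟨s, hs, rfl⟩)
        · exact ⟨a, b, c, Or.inl hs, rfl⟩
        · obtain ⟨a, b, hab, rfl⟩ := (h2 s).mp hs
          refine ⟨a, b, x, Or.inr ⟨hab, rfl⟩, ?_⟩
          rw [hmod, hmod, Int.add_emod (a + b) x 10]
      · rintro ⟨a, b, c, hs | ⟨hab, hc⟩, rfl⟩
        · exact Or.inl ⟨a, b, c, hs, rfl⟩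
        · rw [hc]
          refine Or.inr ⟨(a + b) % 10, (h2 ((a + b) % 10)).mpr ⟨a, b, hab, rfl⟩, ?_⟩
          rw [hmod, hmod, Int.add_emod (a + b) x 10]
    have hres := ih (p ++ [x]) _ _ _ h1' h2' h3'
    simpa [List.append_assoc] using hres

-- ---- A-side characterization ----
lemma pvTails_const (g : Int → Int → Int) (l : List Int) (acc : Int) :
    pvTails (fun a b _ => g a b) l acc = l.foldl g acc := by
  induction l generalizing acc with
  | nil => rfl
  | cons b l ih => simp only [pvTails, List.foldl_cons, ih]

lemma pv_fold_range (n : List Int) (F : Int → Int → List Int → Int) :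
    ∀ (d s : Nat) (acc : Int), n.length ≤ s + d →
      (PySem.List.pyRange (s : Int) (n.length : Int) 1).foldl
        (fun a j => F a (PySem.List.pyGetD n j 0) (n.drop (j.toNat + 1))) acc
      = pvTails F (n.drop s) acc := by
  intro d
  induction d with
  | zero =>
    intro s acc h
    rw [PySem.List.pyRange_one_eq_nil (by exact_mod_cast (by omega : n.length ≤ s)),
      List.drop_eq_nil_of_le (by omega)]
    rfl
  | succ d ih =>
    intro s acc h
    by_cases hs : n.length ≤ s
    · rw [PySem.List.pyRange_one_eq_nil (by exact_mod_cast hs), List.drop_eq_nil_of_le hs]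
      rfl
    · rw [not_le] at hs
      rw [PySem.List.pyRange_one_cons (by exact_mod_cast hs), List.foldl_cons]
      have hdrop : n.drop s = n[s] :: n.drop (s + 1) := List.drop_eq_getElem_cons hs
      rw [hdrop]
      show (PySem.List.pyRange ((s : Int) + 1) (n.length : Int) 1).foldl _
          (F acc (PySem.List.pyGetD n (s : Int) 0) (n.drop ((s : Int).toNat + 1))) = _
      have hg : PySem.List.pyGetD n (s : Int) 0 = n[s] := by
        rw [PySem.List.pyGetD_natCast]
        exact List.getD_eq_getElem n 0 hs
      have hcast : ((s : Int) + 1) = ((s + 1 : Nat) : Int) := by push_cast; ring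
      rw [hg, Int.toNat_natCast, hcast, ih (s + 1) _ (by omega)]
      rfl

lemma pv_range_ext (a m b : Int) (body : Int → Int → Int) (hmb : m ≤ b)
    (hno : ∀ acc i, m ≤ i → body acc i = acc) (acc : Int) :
    (PySem.List.pyRange a m 1).foldl body acc = (PySem.List.pyRange a b 1).foldl body acc := by
  have hfold : ∀ (lo : Int), m ≤ lo → ∀ acc', (PySem.List.pyRange lo b 1).foldl body acc' = acc' := by
    intro lo hlo acc'
    rw [PySem.List.foldl_congr_mem' _ _ (fun acc _ => acc) _
      (by intro i hi acc''; exact hno acc'' i (le_trans hlo (PySem.List.mem_pyRange_one.mp hi).1)),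
      PySem.List.foldl_ignore]
  by_cases ham : a ≤ m
  · rw [PySem.List.pyRange_one_append a m b ham hmb, List.foldl_append, hfold m le_rfl]
  · rw [not_le] at ham
    rw [PySem.List.pyRange_one_eq_nil (le_of_lt ham), List.foldl_nil, hfold a (le_of_lt ham) acc]

lemma pvA_char (n : List Int) : sum_card n = pvAI n 0 := by
  have hmod : ∀ a : Int, PySem.Int.mod a 10 = a % 10 := fun a =>
    PySem.Int.mod_eq_emod_of_pos (by norm_num)
  unfold sum_card
  simp only [hmod, pv_if_max]
  refine Eq.trans (pv_range_ext 0 ((n.length : Int) - 2) (n.length : Int) _ (by omega) ?_ 0) ?_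
  · intro acc i hi
    dsimp only
    rw [PySem.List.pyRange_one_eq_nil (by omega), List.foldl_nil]
  refine Eq.trans (PySem.List.foldl_congr_mem' _ _
      (fun num i => pvAJ (PySem.List.pyGetD n i 0) (n.drop (i.toNat + 1)) num) _ ?_) ?_
  · intro i hi num
    obtain ⟨hi0, hiL⟩ := PySem.List.mem_pyRange_one.mp hi
    dsimp only
    refine Eq.trans (pv_range_ext (i + 1) ((n.length : Int) - 1) (n.length : Int) _ (by omega) ?_ num) ?_
    · intro acc j hj
      dsimp only
      rw [PySem.List.pyRange_one_eq_nil (by omega), List.foldl_nil]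
    refine Eq.trans (PySem.List.foldl_congr_mem' _ _
        (fun num j => pvAK (PySem.List.pyGetD n i 0 + PySem.List.pyGetD n j 0)
          (n.drop (j.toNat + 1)) num) _ ?_) ?_
    · intro j hj num'
      obtain ⟨hj0, hjL⟩ := PySem.List.mem_pyRange_one.mp hj
      dsimp only
      have hcast : (j + 1) = ((j.toNat + 1 : Nat) : Int) := by omega
      rw [hcast]
      exact Eq.trans
        (pv_fold_range n
          (fun a v _ => max a ((PySem.List.pyGetD n i 0 + PySem.List.pyGetD n j 0 + v) % 10))
          n.length (j.toNat + 1) num' (by omega))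
        (pvTails_const _ _ _)
    · have hcast : (i + 1) = ((i.toNat + 1 : Nat) : Int) := by omega
      rw [hcast]
      exact pv_fold_range n
        (fun a v tail => pvAK (PySem.List.pyGetD n i 0 + v) tail a)
        n.length (i.toNat + 1) num (by omega)
  · show (PySem.List.pyRange ((0 : Nat) : Int) (n.length : Int) 1).foldl _ 0 = _
    exact Eq.trans
      (pv_fold_range n (fun acc a tail => pvAJ a tail acc) n.length 0 0 (by omega)) rfl

lemma pvAJ_cons (x b : Int) (l : List Int) (acc : Int) :
    pvAJ x (b :: l) acc = pvAJ x l (pvAK (x + b) l acc) := rfl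
lemma pvAI_cons (a : Int) (l : List Int) (acc : Int) :
    pvAI (a :: l) acc = pvAI l (pvAJ a l acc) := rfl

lemma pvAK_eq (s : Int) (l : List Int) (acc : Int) :
    pvAK s l acc = (l.map (fun b => (s + b) % 10)).foldl max acc := by
  rw [List.foldl_map]; rfl

lemma pvAJ_le (x : Int) (l : List Int) : ∀ acc, acc ≤ pvAJ x l acc := by
  induction l with
  | nil => intro acc; exact le_refl acc
  | cons b l ih =>
    intro acc
    rw [pvAJ_cons]
    calc acc ≤ pvAK (x + b) l acc := by
          rw [pvAK_eq]; exact (PySem.List.le_foldl_max _ _).1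
      _ ≤ pvAJ x l (pvAK (x + b) l acc) := ih _

lemma pvAI_le (l : List Int) : ∀ acc, acc ≤ pvAI l acc := by
  induction l with
  | nil => intro acc; exact le_refl acc
  | cons a l ih =>
    intro acc
    rw [pvAI_cons]
    exact le_trans (pvAJ_le a l acc) (ih _)

lemma pvAJ_dom (x : Int) (l : List Int) :
    ∀ acc a b, [a, b].Sublist l → (x + a + b) % 10 ≤ pvAJ x l acc := by
  induction l with
  | nil => intro acc a b h; exact absurd h (by simp)
  | cons c l ih =>
    intro acc a b h
    rw [pvAJ_cons]
    cases h with
    | cons _ h => exact ih _ a b h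
    | cons₂ _ h =>
      have hb : b ∈ l := List.singleton_sublist.mp h
      have h1 : (x + c + b) % 10 ≤ pvAK (x + c) l acc := by
        rw [pvAK_eq]
        exact (PySem.List.le_foldl_max _ _).2 _ (List.mem_map.mpr ⟨b, hb, rfl⟩)
      exact le_trans h1 (pvAJ_le x l _)

lemma pvAI_dom (l : List Int) :
    ∀ acc a b c, [a, b, c].Sublist l → (a + b + c) % 10 ≤ pvAI l acc := by
  induction l with
  | nil => intro acc a b c h; exact absurd h (by simp)
  | cons d l ih =>
    intro acc a b c h
    rw [pvAI_cons]
    cases h with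
    | cons _ h => exact ih _ a b c h
    | cons₂ _ h =>
      exact le_trans (pvAJ_dom d l acc b c h) (pvAI_le l _)

lemma pvAJ_mem (x : Int) (l : List Int) :
    ∀ acc, pvAJ x l acc = acc ∨
      ∃ a b, [a, b].Sublist l ∧ pvAJ x l acc = (x + a + b) % 10 := by
  induction l with
  | nil => intro acc; exact Or.inl rfl
  | cons c l ih =>
    intro acc
    rw [pvAJ_cons]
    rcases ih (pvAK (x + c) l acc) with h | ⟨a, b, hs, he⟩
    · rw [h, pvAK_eq]
      rcases PySem.List.foldl_max_mem (l.map (fun b => (x + c + b) % 10)) acc with h' | h'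
      · exact Or.inl h'
      · obtain ⟨b, hb, he'⟩ := List.mem_map.mp h'
        exact Or.inr ⟨c, b,
          List.cons_sublist_cons.mpr (List.singleton_sublist.mpr hb), he'.symm⟩
    · exact Or.inr ⟨a, b, hs.cons c, he⟩

lemma pvAI_mem (l : List Int) :
    ∀ acc, pvAI l acc = acc ∨
      ∃ a b c, [a, b, c].Sublist l ∧ pvAI l acc = (a + b + c) % 10 := by
  induction l with
  | nil => intro acc; exact Or.inl rfl
  | cons d l ih =>
    intro acc
    rw [pvAI_cons]
    rcases ih (pvAJ d l acc) with h | ⟨a, b, c, hs, he⟩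
    · rw [h]
      rcases pvAJ_mem d l acc with h' | ⟨a, b, hs, he⟩
      · exact Or.inl h'
      · exact Or.inr ⟨d, a, b, List.cons_sublist_cons.mpr hs, he⟩
    · exact Or.inr ⟨a, b, c, hs.cons d, he⟩

-- ===== VERDICT (by name: the statement is the Claim_ definition above) =====
theorem sum_card_spec : Claim_equal_sum_card := by
  unfold Claim_equal_sum_card Spec_sum_card
  intro n _
  obtain ⟨-, -, h3⟩ := pvB_inv n [] PySem.Set.empty PySem.Set.empty PySem.Set.empty
    (by intro r; simp [PySem.Set.empty, pvR1])
    (by intro r; simp [PySem.Set.empty, pvR2])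
    (by intro r; simp [PySem.Set.empty, pvR3])
  simp only [List.nil_append] at h3
  rw [pvA_char]
  have halt : sum_card_alt n =
      match PySem.List.max?
        ((n.foldl sumCardStep (PySem.Set.empty, PySem.Set.empty, PySem.Set.empty)).2.2)
        (fun y => y) with
      | none => 0
      | some m => m := rfl
  rw [halt]
  cases hmax : PySem.List.max?
      ((n.foldl sumCardStep (PySem.Set.empty, PySem.Set.empty, PySem.Set.empty)).2.2)
      (fun y => y) with
  | none =>
    have hnil := (PySem.List.max?_eq_none_iff _ _).mp hmax
    rcases pvAI_mem n 0 with h | ⟨a, b, c, hs, he⟩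
    · exact h
    · exfalso
      have hmem : (a + b + c) % 10 ∈
          (n.foldl sumCardStep (PySem.Set.empty, PySem.Set.empty, PySem.Set.empty)).2.2 :=
        (h3 _).mpr ⟨a, b, c, hs, rfl⟩
      rw [hnil] at hmem
      exact absurd hmem List.not_mem_nil
  | some m =>
    obtain ⟨a, b, c, hs, hm⟩ := (h3 m).mp (PySem.List.max?_mem hmax)
    have hle1 : m ≤ pvAI n 0 := by rw [hm]; exact pvAI_dom n 0 a b c hs
    have hle2 : pvAI n 0 ≤ m := by
      rcases pvAI_mem n 0 with h | ⟨a', b', c', hs', he'⟩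
      · rw [h, hm]; exact Int.emod_nonneg _ (by norm_num)
      · rw [he']
        exact PySem.List.max?_isMax hmax _ ((h3 _).mpr ⟨a', b', c', hs', rfl⟩)
    exact le_antisymm hle2 hle1
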